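-- pv_equiv track=rewrite | github.com/Spatzi/lies_detector | classification/data_utils.py | _balance_data
-- ===== SOURCE A (Python) =====
-- _truths_label = 1
--
-- _lies_label = 0
--
-- def _balance_data(samples, labels):
--     truths_count = 0
--     lies_count = 0
--     for label in labels:
--         if label == _truths_label:
--             truths_count += 1
--         else:
--             lies_count += 1
--     min_count = min(truths_count, lies_count)
--     new_samples = []
--     new_labels = []
--     new_truths_count = 0
--     new_lies_count = 0
--     for i in range(len(samples)):
--         if new_truths_count == min_count and new_lies_count == min_count:
--             break
--         sample = samples[i]
--         label = labels[i]
--         if label == _truths_label and new_truths_count < min_count: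
--             new_samples.append(sample)
--             new_labels.append(label)
--             new_truths_count += 1
--         if label == _lies_label and new_lies_count < min_count:
--             new_samples.append(sample)
--             new_labels.append(label)
--             new_lies_count += 1
--     return new_samples, new_labels
-- ===== SOURCE B (Python) =====
-- _truths_label = 1
--
-- _lies_label = 0
--
--
-- def _merge(xs, ys):
--     # merge two ascending index lists into one ascending list
--     out = []
--     a = 0
--     b = 0
--     while a < len(xs) and b < len(ys):
--         if xs[a] < ys[b]:
--             out.append(xs[a])
--             a += 1
--         else:
--             out.append(ys[b])
--             b += 1
--     return out + xs[a:] + ys[b:]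
--
--
-- def _balance_data(samples, labels):
--     truths_count = sum(1 for label in labels if label == _truths_label)
--     min_count = min(truths_count, len(labels) - truths_count)
--     ones = [i for i in range(len(samples)) if labels[i] == _truths_label][:min_count]
--     zeros = [i for i in range(len(samples)) if labels[i] == _lies_label][:min_count]
--     idx = _merge(ones, zeros)
--     return [samples[i] for i in idx], [labels[i] for i in idx]
-- ===== Notes on version B (the rewrite author's own statement) =====
-- stated objective: alternative
-- what changed: Replaces A's single interleaved selection loop with break and two running quota counters by a partition-then-merge shape: count truths once, build the two capped index lists (ones/zeros) separately, merge them in ascending order and map samples/labels over the merged index list.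
-- outside the precondition, e.g. on _balance_data([1, 2], [1]): A returns ([], []), B raises IndexError; on _balance_data([1, 2, 3], [1, 0]): A returns ([1, 2], [1, 0]), B raises IndexError
import Mathlib
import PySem

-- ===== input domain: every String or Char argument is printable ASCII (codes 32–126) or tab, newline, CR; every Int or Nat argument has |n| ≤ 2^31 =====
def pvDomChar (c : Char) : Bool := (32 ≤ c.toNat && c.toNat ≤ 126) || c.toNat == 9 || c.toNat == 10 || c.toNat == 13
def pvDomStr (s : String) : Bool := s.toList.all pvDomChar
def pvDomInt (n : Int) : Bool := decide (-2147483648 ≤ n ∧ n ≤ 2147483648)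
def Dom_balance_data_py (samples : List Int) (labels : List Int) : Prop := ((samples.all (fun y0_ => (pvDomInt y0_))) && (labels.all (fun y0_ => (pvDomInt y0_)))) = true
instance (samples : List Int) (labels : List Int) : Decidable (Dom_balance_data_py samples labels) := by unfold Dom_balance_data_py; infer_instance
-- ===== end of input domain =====

-- B replaces A's interleaved counting loop (with break) by partition-then-merge over index
-- lists; equal return values are proved on len(samples) ≤ len(labels) (objective: alternative).

-- ===== PORT A =====
-- the second `for` loop of A: iterates over the remaining indices, with `break` = stop;
-- pyGet? none (IndexError, possible only when labels is shorter than samples) stops the loop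
-- and is excluded by Pre_ below.
def balA_loop (samples : List Int) (labels : List Int) (min_count : Int) :
    List Nat → List Int → List Int → Int → Int → List Int × List Int
  | [], ns, nl, _, _ => (ns, nl)
  | i :: rest, ns, nl, ntc, nlc =>
    if ntc = min_count ∧ nlc = min_count then (ns, nl)
    else
      match PySem.List.pyGet? samples (Int.ofNat i), PySem.List.pyGet? labels (Int.ofNat i) with
      | some sample, some label =>
        let st1 : List Int × List Int × Int :=
          if label = 1 ∧ ntc < min_count then (ns ++ [sample], nl ++ [label], ntc + 1)
          else (ns, nl, ntc)
        let st2 : List Int × List Int × Int :=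
          if label = 0 ∧ nlc < min_count then (st1.1 ++ [sample], st1.2.1 ++ [label], nlc + 1)
          else (st1.1, st1.2.1, nlc)
        balA_loop samples labels min_count rest st2.1 st2.2.1 st1.2.2 st2.2.2
      | _, _ => (ns, nl)

def balance_data_py (samples : List Int) (labels : List Int) : List Int × List Int :=
  let counts :=
    labels.foldl
      (fun (p : Int × Int) label => if label = 1 then (p.1 + 1, p.2) else (p.1, p.2 + 1))
      (0, 0)
  let min_count := min counts.1 counts.2
  balA_loop samples labels min_count (List.range samples.length) [] [] 0 0

-- ===== PORT B =====
-- _merge from Source B: merge two ascending index lists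
def balB_merge : List Nat → List Nat → List Nat
  | [], ys => ys
  | x :: xs, [] => x :: xs
  | x :: xs, y :: ys =>
    if x < y then x :: balB_merge xs (y :: ys) else y :: balB_merge (x :: xs) ys

def balance_data_py_alt (samples : List Int) (labels : List Int) : List Int × List Int :=
  let truths_count : Int := labels.countP (fun label => label == 1)
  let min_count : Int := min truths_count ((labels.length : Int) - truths_count)
  let ones :=
    ((List.range samples.length).filter (fun i => labels.getD i 0 == 1)).take min_count.toNat
  let zeros :=
    ((List.range samples.length).filter (fun i => labels.getD i 0 == 0)).take min_count.toNat
  let idx := balB_merge ones zeros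
  (idx.map (fun i => samples.getD i 0), idx.map (fun i => labels.getD i 0))

-- ===== PRECONDITION & SPEC =====
-- Pre_ excludes inputs with len(samples) > len(labels): there A either raises IndexError at
-- labels[i] or returns only thanks to its early break, while B reads labels[i] for every
-- i < len(samples) and hence raises IndexError on all of them.
def Pre_balance_data_py (samples : List Int) (labels : List Int) : Prop :=
  samples.length ≤ labels.length
instance (samples : List Int) (labels : List Int) : Decidable (Pre_balance_data_py samples labels) := by unfold Pre_balance_data_py; infer_instance

def pvWitness_balance_data_py : List Int × List Int := ([10, 20, 30], [1, 0, 1])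

def Spec_balance_data_py (samples : List Int) (labels : List Int) (out : List Int × List Int) : Prop := out = balance_data_py_alt samples labels
instance (samples : List Int) (labels : List Int) (out : List Int × List Int) : Decidable (Spec_balance_data_py samples labels out) := by unfold Spec_balance_data_py; infer_instance

-- ===== CLAIM (what is proved, stated in full; the proofs are below) =====
def Claim_equal_balance_data_py : Prop := ∀ (samples : List Int) (labels : List Int), Dom_balance_data_py samples labels → Pre_balance_data_py samples labels → Spec_balance_data_py samples labels (balance_data_py samples labels)

-- ===== LEMMAS AND PROOFS =====

-- reference selection: walk the index list, taking a 1-labelled index while the truth quota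
-- tq is positive and a 0-labelled index while the lie quota lq is positive
def selN (lab : Nat → Int) : List Nat → Nat → Nat → List Nat
  | [], _, _ => []
  | i :: r, tq, lq =>
    if lab i = 1 then
      (if 0 < tq then i :: selN lab r (tq - 1) lq else selN lab r tq lq)
    else if lab i = 0 then
      (if 0 < lq then i :: selN lab r tq (lq - 1) else selN lab r tq lq)
    else selN lab r tq lq

theorem selN_zero (lab : Nat → Int) (is : List Nat) : selN lab is 0 0 = [] := by
  induction is with
  | nil => rfl
  | cons i r ih => simp [selN, ih]

theorem countFold (labels : List Int) : ∀ (a b : Int),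
    labels.foldl
      (fun (p : Int × Int) label => if label = 1 then (p.1 + 1, p.2) else (p.1, p.2 + 1))
      (a, b)
    = (a + labels.countP (fun label => label == 1),
       b + ((labels.length : Int) - labels.countP (fun label => label == 1))) := by
  induction labels with
  | nil => intro a b; simp
  | cons l r ih =>
    intro a b
    rw [List.foldl_cons]
    by_cases h : l = 1
    · simp [h, ih, List.countP_cons, Prod.ext_iff]; omega
    · simp [h, ih, List.countP_cons, Prod.ext_iff]; omega

theorem merge_nil_right (xs : List Nat) : balB_merge xs [] = xs := by
  cases xs <;> simp [balB_merge]

theorem merge_cons_left (x : Nat) (xs ys : List Nat) (h : ∀ y ∈ ys, x < y) :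
    balB_merge (x :: xs) ys = x :: balB_merge xs ys := by
  cases ys with
  | nil => simp [merge_nil_right]
  | cons y ys => simp [balB_merge, h y (by simp)]

theorem merge_cons_right (y : Nat) (xs ys : List Nat) (h : ∀ x ∈ xs, y < x) :
    balB_merge xs (y :: ys) = y :: balB_merge xs ys := by
  cases xs with
  | nil => simp [balB_merge]
  | cons x xs =>
    have : ¬ x < y := by have := h x (by simp); omega
    simp [balB_merge, this]

-- merging the two capped filtered index lists equals the reference selection
theorem merge_take_eq_selN (lab : Nat → Int) :
    ∀ (is : List Nat), is.Pairwise (· < ·) → ∀ (tq lq : Nat),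
    balB_merge ((is.filter (fun i => lab i == 1)).take tq)
               ((is.filter (fun i => lab i == 0)).take lq)
    = selN lab is tq lq := by
  intro is
  induction is with
  | nil => intro _ tq lq; simp [selN, balB_merge]
  | cons i r ih =>
    intro hp tq lq
    have hpr : r.Pairwise (· < ·) := hp.of_cons
    have hlt : ∀ j ∈ r, i < j := fun j hj => (List.pairwise_cons.mp hp).1 j hj
    by_cases h1 : lab i = 1
    · have h0 : ¬ (lab i = 0) := by omega
      cases tq with
      | zero =>
        rw [selN]
        simp only [h1, h0, if_true, if_false, ite_true, ite_false, Nat.lt_irrefl,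
          List.filter_cons, beq_iff_eq, decide_true, decide_false, List.take_zero]
        rw [← ih hpr 0 lq]
        simp
      | succ t =>
        rw [selN]
        have hz : ∀ y ∈ (r.filter (fun j => lab j == 0)).take lq, i < y := fun y hy =>
          hlt y (List.mem_of_mem_filter (List.mem_of_mem_take hy))
        simp [h1, h0, List.filter_cons]
        rw [merge_cons_left _ _ _ hz, ih hpr t lq]
    · by_cases h0 : lab i = 0
      · cases lq with
        | zero =>
          rw [selN]
          simp only [h1, h0, if_true, if_false, ite_true, ite_false, Nat.lt_irrefl,
            List.filter_cons, beq_iff_eq, List.take_zero]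
          rw [← ih hpr tq 0]
          simp [merge_nil_right]
        | succ l =>
          rw [selN]
          have hz : ∀ y ∈ (r.filter (fun j => lab j == 1)).take tq, i < y := fun y hy =>
            hlt y (List.mem_of_mem_filter (List.mem_of_mem_take hy))
          simp [h1, h0, List.filter_cons]
          rw [merge_cons_right _ _ _ hz, ih hpr tq l]
      · rw [selN]
        simp only [h1, h0, List.filter_cons, beq_iff_eq, if_false, ite_false]
        exact ih hpr tq lq

-- A's loop equals the reference selection (quotas as remaining Nat counts)
theorem loopA_eq_selN (samples labels : List Int) (mc : Int) :
    ∀ (is : List Nat) (ns nl : List Int) (ntc nlc : Int),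
    (∀ i ∈ is, i < samples.length ∧ i < labels.length) →
    0 ≤ ntc → ntc ≤ mc → 0 ≤ nlc → nlc ≤ mc →
    balA_loop samples labels mc is ns nl ntc nlc =
      (ns ++ (selN (fun i => labels.getD i 0) is (mc - ntc).toNat (mc - nlc).toNat).map
          (fun i => samples.getD i 0),
       nl ++ (selN (fun i => labels.getD i 0) is (mc - ntc).toNat (mc - nlc).toNat).map
          (fun i => labels.getD i 0)) := by
  intro is
  induction is with
  | nil => intro ns nl ntc nlc _ _ _ _ _; simp [balA_loop, selN]
  | cons i r ih =>
    intro ns nl ntc nlc hm h0t hts h0l hls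
    have his : i < samples.length := (hm i (by simp)).1
    have hil : i < labels.length := (hm i (by simp)).2
    have hmr : ∀ j ∈ r, j < samples.length ∧ j < labels.length := fun j hj => hm j (by simp [hj])
    have hgs : PySem.List.pyGet? samples (Int.ofNat i) = some (samples.getD i 0) := by
      rw [Int.ofNat_eq_natCast, PySem.List.pyGet?_natCast]
      simp [his, List.getD, List.getElem?_eq_getElem]
    have hgl : PySem.List.pyGet? labels (Int.ofNat i) = some (labels.getD i 0) := by
      rw [Int.ofNat_eq_natCast, PySem.List.pyGet?_natCast]
      simp [hil, List.getD, List.getElem?_eq_getElem]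
    by_cases hbrk : ntc = mc ∧ nlc = mc
    · have ht : (mc - ntc).toNat = 0 := by omega
      have h2 : (mc - nlc).toNat = 0 := by omega
      simp [balA_loop, hbrk, ht, h2, selN_zero]
    · rw [balA_loop.eq_def]
      simp only [hbrk, if_false, ite_false, hgs, hgl]
      rw [selN]
      by_cases h1 : labels.getD i 0 = (1 : Int)
      · have h0 : ¬ (labels.getD i 0 = (0 : Int)) := by omega
        by_cases hq : ntc < mc
        · have hpos : 0 < (mc - ntc).toNat := by omega
          have ht1 : (mc - ntc).toNat - 1 = (mc - (ntc + 1)).toNat := by omega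
          simp only [h1, h0, hq, one_ne_zero, and_true, true_and, and_false, false_and,
            if_true, if_false, ite_true, ite_false, hpos]
          rw [ih _ _ _ _ hmr (by omega) (by omega) h0l hls, ht1]
          simp [h1]
          simpa [List.getD_eq_getElem?_getD] using h1.symm
        · have ht0 : (mc - ntc).toNat = 0 := by omega
          simp only [h1, h0, hq, one_ne_zero, and_true, true_and, and_false, false_and,
            if_true, if_false, ite_true, ite_false, ht0, Nat.lt_irrefl]
          rw [ih _ _ _ _ hmr h0t hts h0l hls, ht0]
      · by_cases h0 : labels.getD i 0 = (0 : Int)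
        · by_cases hq : nlc < mc
          · have hpos : 0 < (mc - nlc).toNat := by omega
            have hl1 : (mc - nlc).toNat - 1 = (mc - (nlc + 1)).toNat := by omega
            simp only [h1, h0, hq, zero_ne_one, and_true, true_and, and_false, false_and,
              if_true, if_false, ite_true, ite_false, hpos]
            rw [ih _ _ _ _ hmr h0t hts (by omega) (by omega), hl1]
            simp [h1, h0]
            simpa [List.getD_eq_getElem?_getD] using h0.symm
          · have hl0 : (mc - nlc).toNat = 0 := by omega
            simp only [h1, h0, hq, zero_ne_one, and_true, true_and, and_false, false_and,
              if_true, if_false, ite_true, ite_false, hl0, Nat.lt_irrefl]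
            rw [ih _ _ _ _ hmr h0t hts h0l hls, hl0]
        · simp only [h1, h0, and_true, true_and, and_false, false_and, if_false, ite_false]
          exact ih _ _ _ _ hmr h0t hts h0l hls

-- ===== VERDICT (by name: the statement is the Claim_ definition above) =====
theorem balance_data_py_spec : Claim_equal_balance_data_py := by
  intro samples labels _ hpre
  unfold Spec_balance_data_py balance_data_py balance_data_py_alt
  rw [countFold]
  set tc : Int := ((labels.countP (fun label => label == 1) : Nat) : Int) with htc
  have htc0 : 0 ≤ tc := by positivity
  have htclen : tc ≤ (labels.length : Int) := by
    rw [htc]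
    exact_mod_cast List.countP_le_length (l := labels) (p := fun label => label == 1)
  have hmc' : min (0 + tc) (0 + ((labels.length : Int) - tc))
      = min tc ((labels.length : Int) - tc) := by ring_nf
  have hmc0 : 0 ≤ min tc ((labels.length : Int) - tc) := by omega
  simp only [hmc']
  rw [loopA_eq_selN samples labels _ (List.range samples.length) [] [] 0 0
      (by intro i hi; have := List.mem_range.mp hi
          exact ⟨this, by unfold Pre_balance_data_py at hpre; omega⟩)
      le_rfl hmc0 le_rfl hmc0]
  rw [merge_take_eq_selN (fun i => labels.getD i 0) (List.range samples.length)
      (List.pairwise_lt_range)]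
  simp
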